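-- pv_equiv track=rewrite | github.com/frankhjung/python-wordpuzzle | utils/filters.py | is_valid_word
-- ===== SOURCE A (Python) =====
-- def is_valid_word(size, mandatory, letters, word):
--     """ Check that a dictionary word only contains valid letters
--         and is of the correct size.
--     """
--     if size > len(word) or len(word) > 9:
--         return False
--
--     if mandatory not in word:
--         return False
--
--     # test all letters in word are valid
--     working = letters[:]
--     for letter in word:
--         if letter in working:
--             working.remove(letter)
--         else:
--             return False
--
--     return True
-- ===== SOURCE B (Python) =====
-- def is_valid_word(size, mandatory, letters, word):
--     """Same checks, but the per-letter remove loop is replaced by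
--     frequency tables built once and compared."""
--     if size > len(word) or len(word) > 9:
--         return False
--     if mandatory not in word:
--         return False
--     need = {}
--     for ch in word:
--         need[ch] = need.get(ch, 0) + 1
--     have = {}
--     for l in letters:
--         have[l] = have.get(l, 0) + 1
--     return all(n <= have.get(ch, 0) for ch, n in need.items())
-- ===== Notes on version B (the rewrite author's own statement) =====
-- stated objective: alternative
-- what changed: The per-letter 'in working / remove' loop that mutates a copy of the letter pool is replaced by two frequency tables (word counts and letter counts) built once and compared with a multiset-subset test; the early-exit remove loop disappears.
import Mathlib
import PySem

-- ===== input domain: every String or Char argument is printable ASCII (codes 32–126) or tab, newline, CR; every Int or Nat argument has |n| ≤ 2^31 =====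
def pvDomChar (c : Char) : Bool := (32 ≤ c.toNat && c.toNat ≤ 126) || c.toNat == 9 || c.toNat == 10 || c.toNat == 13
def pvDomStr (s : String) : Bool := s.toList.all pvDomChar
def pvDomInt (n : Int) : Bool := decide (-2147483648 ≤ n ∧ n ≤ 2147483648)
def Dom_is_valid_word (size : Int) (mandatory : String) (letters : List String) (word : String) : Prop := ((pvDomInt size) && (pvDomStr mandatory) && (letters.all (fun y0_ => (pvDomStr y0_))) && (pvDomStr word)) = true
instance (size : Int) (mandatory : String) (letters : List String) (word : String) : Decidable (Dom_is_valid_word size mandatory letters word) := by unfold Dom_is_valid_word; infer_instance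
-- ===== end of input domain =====

-- ===== PORT A =====
-- B changes nothing observable: A's remove-loop over a mutated copy of the pool becomes a frequency-table subset test.
-- Python iterates over the chars of `word` as 1-char strings; membership/removal in the pool is by string equality,
-- ported as `String.ofList [c]`.
def isValidWorkingLoop (cs : List Char) (working : List String) : Bool :=
  match cs with
  | [] => true
  | c :: rest =>
    if working.contains (String.ofList [c]) then
      isValidWorkingLoop rest (working.erase (String.ofList [c]))
    else false

def is_valid_word (size : Int) (mandatory : String) (letters : List String) (word : String) : Bool :=
  if size > PySem.Str.len word || PySem.Str.len word > 9 then false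
  else if !(PySem.Str.isIn mandatory word) then false
  else isValidWorkingLoop word.toList letters

-- ===== PORT B =====
-- Source B's two counting loops build Counters (ported as PySem.Dict.counter, whose definition is exactly that fold);
-- the final all(...) compares them; the lookup key for a char ch is the 1-char string Python iterates with.
def is_valid_word_alt (size : Int) (mandatory : String) (letters : List String) (word : String) : Bool :=
  if size > PySem.Str.len word || PySem.Str.len word > 9 then false
  else if !(PySem.Str.isIn mandatory word) then false
  else
    (PySem.Dict.counter word.toList).items.all
      (fun p => decide (p.2 ≤ (PySem.Dict.counter letters).getD (String.ofList [p.1]) 0))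

-- ===== PRECONDITION & SPEC =====
def Spec_is_valid_word (size : Int) (mandatory : String) (letters : List String) (word : String) (out : Bool) : Prop := out = is_valid_word_alt size mandatory letters word
instance (size : Int) (mandatory : String) (letters : List String) (word : String) (out : Bool) : Decidable (Spec_is_valid_word size mandatory letters word out) := by unfold Spec_is_valid_word; infer_instance

-- ===== CLAIM (what is proved, stated in full; the proofs are below) =====
def Claim_equal_is_valid_word : Prop := ∀ (size : Int) (mandatory : String) (letters : List String) (word : String), Dom_is_valid_word size mandatory letters word → Spec_is_valid_word size mandatory letters word (is_valid_word size mandatory letters word)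

-- ===== LEMMAS AND PROOFS =====

lemma ofList_singleton_inj {x y : Char} (h : String.ofList [x] = String.ofList [y]) : x = y := by
  have := congrArg String.toList h
  simpa using this

-- A's remove-loop succeeds iff each char of cs occurs in the pool at least as often as in cs.
lemma loop_iff_counts (cs : List Char) (pool : List String) :
    isValidWorkingLoop cs pool = true ↔
      ∀ c ∈ cs, cs.count c ≤ pool.count (String.ofList [c]) := by
  induction cs generalizing pool with
  | nil => simp [isValidWorkingLoop]
  | cons c rest ih =>
    by_cases hm : String.ofList [c] ∈ pool
    · have hpos : 1 ≤ pool.count (String.ofList [c]) := List.one_le_count_iff.mpr hm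
      have herase : ∀ d : Char,
          (pool.erase (String.ofList [c])).count (String.ofList [d])
            = pool.count (String.ofList [d]) - (if d = c then 1 else 0) := by
        intro d
        rw [List.count_erase]
        by_cases hdc : d = c
        · subst hdc; simp
        · have hne : (String.ofList [c] == String.ofList [d]) = false := by
            rw [beq_eq_false_iff_ne]
            exact fun he => hdc (ofList_singleton_inj he).symm
          simp [hne, hdc]
      simp only [isValidWorkingLoop, List.contains_eq_mem, hm, decide_true, if_true]
      rw [ih]
      constructor
      · intro h d hd
        rcases List.mem_cons.mp hd with rfl | hdr
        · rw [List.count_cons]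
          by_cases hcr : d ∈ rest
          · have := h d hcr
            rw [herase, if_pos rfl] at this
            simp only [beq_self_eq_true, if_true]
            omega
          · rw [List.count_eq_zero_of_not_mem hcr]
            simp only [beq_self_eq_true, if_true]
            omega
        · rw [List.count_cons]
          by_cases hdc : d = c
          · subst hdc
            have := h d hdr
            rw [herase, if_pos rfl] at this
            simp only [beq_self_eq_true, if_true]
            omega
          · have := h d hdr
            rw [herase, if_neg hdc] at this
            have hbc : (c == d) = false := by
              rw [beq_eq_false_iff_ne]; exact fun he => hdc he.symm
            simp only [hbc, Bool.false_eq_true, if_false]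
            omega
      · intro h d hd
        by_cases hdc : d = c
        · subst hdc
          have := h d List.mem_cons_self
          rw [List.count_cons] at this
          rw [herase, if_pos rfl]
          simp only [beq_self_eq_true, if_true] at this
          omega
        · have := h d (List.mem_cons_of_mem _ hd)
          rw [List.count_cons] at this
          have hbc : (c == d) = false := by
            rw [beq_eq_false_iff_ne]; exact fun he => hdc he.symm
          simp only [hbc, Bool.false_eq_true, if_false] at this
          rw [herase, if_neg hdc]
          omega
    · simp only [isValidWorkingLoop, List.contains_eq_mem, hm, decide_false]
      constructor
      · intro h
        exact absurd h (by simp)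
      · intro h
        exfalso
        have := h c List.mem_cons_self
        rw [List.count_eq_zero_of_not_mem hm, List.count_cons] at this
        simp at this

-- B's counter comparison states exactly the same condition.
lemma alt_counts (letters : List String) (word : String) :
    ((PySem.Dict.counter word.toList).items.all
        (fun p => decide (p.2 ≤ (PySem.Dict.counter letters).getD (String.ofList [p.1]) 0)) = true) ↔
      ∀ c ∈ word.toList, word.toList.count c ≤ letters.count (String.ofList [c]) := by
  rw [PySem.Dict.items_counter]
  simp only [List.all_map, List.all_eq_true, Function.comp, decide_eq_true_eq,
    PySem.Dict.getD_counter]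
  constructor
  · intro h c hc
    have := h c (by rw [PySem.Set.mem_ofList]; exact hc)
    exact_mod_cast this
  · intro h c hc
    have hc' : c ∈ word.toList := (PySem.Set.mem_ofList _ _).mp hc
    exact_mod_cast h c hc'

-- ===== VERDICT (by name: the statement is the Claim_ definition above) =====
theorem is_valid_word_spec : Claim_equal_is_valid_word := by
  intro size mandatory letters word _
  unfold Spec_is_valid_word is_valid_word is_valid_word_alt
  split
  · rfl
  · split
    · rfl
    · rw [Bool.eq_iff_iff, loop_iff_counts, alt_counts]
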